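-- pv_equiv track=rewrite | github.com/thisismygitrepo/machineconfig | .github/skills/make-github-installer-config/scripts/build_installer_config.py | infer_best_pattern
-- ===== SOURCE A (Python) =====
-- from collections import Counter
--
-- def infer_best_pattern(candidates: list[str], os_name: str) -> str | None:
--     if len(candidates) == 0:
--         return None
--     counts: Counter[str] = Counter(candidates)
--     ranked: list[tuple[str, int]] = sorted(counts.items(), key=lambda row: row[1], reverse=True)
--
--     if os_name == "linux":
--         musl_first: list[tuple[str, int]] = [item for item in ranked if "musl" in item[0].lower()]
--         if len(musl_first) > 0:
--             return musl_first[0][0]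
--     return ranked[0][0]
-- ===== SOURCE B (Python) =====
-- from collections import Counter
--
--
-- def infer_best_pattern(candidates: list[str], os_name: str) -> str | None:
--     if not candidates:
--         return None
--     counts = Counter(candidates)
--     if os_name == "linux":
--         musl_keys = [k for k in counts if "musl" in k.lower()]
--         if musl_keys:
--             return max(musl_keys, key=lambda k: counts[k])
--     return max(counts, key=lambda k: counts[k])
-- ===== Notes on version B (the rewrite author's own statement) =====
-- stated objective: simpler
-- what changed: Replaces the full descending sort of the count table (and the list comprehension over the ranked pairs) by single linear max() scans over the Counter keys, relying on max() returning the first key attaining the maximum in Counter insertion order, which equals the head of the stable descending sort.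
import Mathlib
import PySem

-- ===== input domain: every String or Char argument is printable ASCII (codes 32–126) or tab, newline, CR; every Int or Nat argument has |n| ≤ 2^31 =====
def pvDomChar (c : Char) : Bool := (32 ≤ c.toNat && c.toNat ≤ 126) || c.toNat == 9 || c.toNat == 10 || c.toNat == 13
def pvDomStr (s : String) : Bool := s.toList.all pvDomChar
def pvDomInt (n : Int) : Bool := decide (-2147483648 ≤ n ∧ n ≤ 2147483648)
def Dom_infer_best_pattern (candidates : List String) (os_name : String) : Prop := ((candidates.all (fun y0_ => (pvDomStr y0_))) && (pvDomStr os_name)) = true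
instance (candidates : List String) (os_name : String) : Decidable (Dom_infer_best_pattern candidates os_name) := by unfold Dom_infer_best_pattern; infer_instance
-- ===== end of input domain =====

-- B replaces A's full descending sort of the count table by linear first-max scans
-- over the Counter keys (objective: simpler; return value only, no mutation involved).

-- ===== PORT A =====
def infer_best_pattern (candidates : List String) (os_name : String) : Option String :=
  if candidates.length = 0 then none
  else
    let counts : PySem.Dict String Int := PySem.Dict.counter candidates
    let ranked : List (String × Int) := PySem.List.sorted counts.items (fun row => row.2) true
    if os_name == "linux" then
      let musl_first : List (String × Int) :=
        ranked.filter (fun item => PySem.Str.isIn "musl" (PySem.Str.lower item.1))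
      if musl_first.length > 0 then (PySem.List.pyGet? musl_first 0).map Prod.fst
      else (PySem.List.pyGet? ranked 0).map Prod.fst
    else (PySem.List.pyGet? ranked 0).map Prod.fst

-- ===== PORT B =====
def infer_best_pattern_alt (candidates : List String) (os_name : String) : Option String :=
  if candidates = [] then none
  else
    let counts : PySem.Dict String Int := PySem.Dict.counter candidates
    if os_name == "linux" then
      let musl_keys : List String :=
        counts.keys.filter (fun k => PySem.Str.isIn "musl" (PySem.Str.lower k))
      if musl_keys ≠ [] then PySem.List.max? musl_keys (fun k => counts.getD k 0)
      else PySem.List.max? counts.keys (fun k => counts.getD k 0)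
    else PySem.List.max? counts.keys (fun k => counts.getD k 0)

-- ===== PRECONDITION & SPEC =====
def Spec_infer_best_pattern (candidates : List String) (os_name : String) (out : Option String) : Prop := out = infer_best_pattern_alt candidates os_name
instance (candidates : List String) (os_name : String) (out : Option String) : Decidable (Spec_infer_best_pattern candidates os_name out) := by unfold Spec_infer_best_pattern; infer_instance

-- ===== CLAIM (what is proved, stated in full; the proofs are below) =====
def Claim_equal_infer_best_pattern : Prop := ∀ (candidates : List String) (os_name : String), Dom_infer_best_pattern candidates os_name → Spec_infer_best_pattern candidates os_name (infer_best_pattern candidates os_name)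

-- ===== LEMMAS AND PROOFS =====

theorem pyGet?_zero_eq_head? {α : Type} (l : List α) :
    PySem.List.pyGet? l 0 = l.head? := by
  cases l <;> simp [PySem.List.pyGet?, PySem.List.pyIdx?]

-- appending one element to the input of the stable sort is one insertBy into the output
theorem sorted_rev_append_singleton {α κ : Type} [LT κ] [DecidableLT κ]
    (l : List α) (x : α) (key : α → κ) :
    PySem.List.sorted (l ++ [x]) key true =
      PySem.List.insertBy (fun a b => decide (key b < key a)) x (PySem.List.sorted l key true) := by
  simp [PySem.List.sorted, List.foldl_append]

-- filtering the result of insertBy into a descending-sorted list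
theorem filter_insertBy_rev {α κ : Type} [LinearOrder κ]
    (key : α → κ) (p : α → Bool) (x : α) :
    ∀ (acc : List α), acc.Pairwise (fun a b => key b ≤ key a) →
      (PySem.List.insertBy (fun a b => decide (key b < key a)) x acc).filter p =
        if p x then PySem.List.insertBy (fun a b => decide (key b < key a)) x (acc.filter p)
        else acc.filter p := by
  intro acc
  induction acc with
  | nil => intro _; by_cases h : p x <;> simp [PySem.List.insertBy, h]
  | cons y ys ih =>
    intro hpw
    obtain ⟨hall, hpw'⟩ := List.pairwise_cons.mp hpw
    by_cases hb : key y < key x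
    · have h1 : PySem.List.insertBy (fun a b => decide (key b < key a)) x (y :: ys) =
          x :: y :: ys := by
        simp [PySem.List.insertBy, hb]
      rw [h1]
      by_cases hp : p x
      · rw [if_pos hp, List.filter_cons, if_pos hp]
        symm
        cases hf : (y :: ys).filter p with
        | nil => simp [PySem.List.insertBy]
        | cons z zs =>
          have hz : z ∈ (y :: ys).filter p := by rw [hf]; exact List.mem_cons_self
          have hzy : key z ≤ key y := by
            rcases List.mem_cons.mp (List.mem_of_mem_filter hz) with h | h
            · exact h ▸ le_refl _
            · exact hall z h
          simp [PySem.List.insertBy, lt_of_le_of_lt hzy hb]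
      · rw [if_neg hp, List.filter_cons, if_neg (by simpa using hp)]
    · have hstep : PySem.List.insertBy (fun a b => decide (key b < key a)) x (y :: ys) =
          y :: PySem.List.insertBy (fun a b => decide (key b < key a)) x ys := by
        simp [PySem.List.insertBy, hb]
      rw [hstep]
      simp only [List.filter_cons, ih hpw']
      by_cases hp : p x <;> by_cases hy : p y <;>
        simp [hp, hy, PySem.List.insertBy, hb]

-- filter commutes with the stable descending sort
theorem filter_sorted_rev {α κ : Type} [LinearOrder κ] (l : List α) (key : α → κ) (p : α → Bool) :
    (PySem.List.sorted l key true).filter p = PySem.List.sorted (l.filter p) key true := by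
  induction l using List.reverseRecOn with
  | nil => simp [PySem.List.sorted]
  | append_singleton l x ih =>
    rw [sorted_rev_append_singleton,
      filter_insertBy_rev key p x _ (PySem.List.sorted_pairwise_rev l key),
      ih, List.filter_append]
    by_cases hp : p x
    · rw [if_pos hp]; simp [hp, sorted_rev_append_singleton]
    · rw [if_neg hp]; simp [hp]

-- the head of the stable descending sort is the first maximum of the list
theorem head?_sorted_rev {α κ : Type} [LinearOrder κ] (l : List α) (key : α → κ) :
    (PySem.List.sorted l key true).head? = PySem.List.max? l key := by
  induction l using List.reverseRecOn with
  | nil => simp [PySem.List.sorted, PySem.List.max?]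
  | append_singleton l x ih =>
    rw [sorted_rev_append_singleton]
    have hmax : PySem.List.max? (l ++ [x]) key =
        match PySem.List.max? l key with
        | none => some x
        | some m => if key m < key x then some x else some m := by
      simp only [PySem.List.max?, List.foldl_append, List.foldl_cons, List.foldl_nil]
      rfl
    rw [hmax, ← ih]
    cases hs : PySem.List.sorted l key true with
    | nil => simp [PySem.List.insertBy]
    | cons m t =>
      by_cases hb : key m < key x
      · simp [PySem.List.insertBy, hb]
      · simp [PySem.List.insertBy, hb]

-- the first maximum of a mapped list
theorem max?_map {α β κ : Type} [LinearOrder κ] (l : List α) (f : α → β) (key : β → κ) :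
    PySem.List.max? (l.map f) key = (PySem.List.max? l (fun x => key (f x))).map f := by
  simp only [PySem.List.max?, List.foldl_map]
  have : ∀ (acc : Option α),
      l.foldl (fun acc x => match acc with
        | none => some (f x)
        | some m => if key m < key (f x) then some (f x) else some m) (acc.map f) =
      (l.foldl (fun acc x => match acc with
        | none => some x
        | some m => if key (f m) < key (f x) then some x else some m) acc).map f := by
    induction l with
    | nil => intro acc; rfl
    | cons y ys ih =>
      intro acc
      cases acc with
      | none => simpa using ih (some y)
      | some m =>
        by_cases h : key (f m) < key (f y)
        · simp only [List.foldl_cons, Option.map_some, h]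
          simpa using ih (some y)
        · simp only [List.foldl_cons, Option.map_some, h]
          simpa using ih (some m)
  simpa using this none

-- ===== VERDICT (by name: the statement is the Claim_ definition above) =====
theorem infer_best_pattern_spec : Claim_equal_infer_best_pattern := by
  intro candidates os_name _
  unfold Spec_infer_best_pattern infer_best_pattern infer_best_pattern_alt
  by_cases hnil : candidates = []
  · simp [hnil]
  · have hlen : ¬ candidates.length = 0 := by simp [hnil]
    rw [if_neg hlen]; rw [if_neg hnil]
    simp only [PySem.Dict.items_counter, PySem.Dict.keys_counter]
    set keys := PySem.Set.ofList candidates with hkeys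
    set p : String → Bool := fun k => PySem.Str.isIn "musl" (PySem.Str.lower k) with hp
    set cnt : String → Int := fun k => (candidates.count k : Int) with hcnt
    have hgetD : (fun k => (PySem.Dict.counter candidates).getD k 0) = cnt := by
      funext k; simp [hcnt, PySem.Dict.getD_counter]
    -- main scan: head of the sorted items equals the first-max key
    have hmain : (PySem.List.pyGet? (PySem.List.sorted (keys.map fun k => (k, cnt k))
          (fun row => row.2) true) 0).map Prod.fst = PySem.List.max? keys cnt := by
      rw [pyGet?_zero_eq_head?, head?_sorted_rev, max?_map]
      cases PySem.List.max? keys (fun x => (fun (row : String × Int) => row.2) ((fun k => (k, cnt k)) x)) <;> simp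
    -- musl scan
    have hfilter : (keys.map fun k => (k, cnt k)).filter (fun item => p item.1)
        = (keys.filter p).map fun k => (k, cnt k) := by
      rw [List.filter_map]; rfl
    have hmusl : (PySem.List.pyGet? ((PySem.List.sorted (keys.map fun k => (k, cnt k))
          (fun row => row.2) true).filter (fun item => p item.1)) 0).map Prod.fst
        = PySem.List.max? (keys.filter p) cnt := by
      rw [pyGet?_zero_eq_head?, filter_sorted_rev, hfilter, head?_sorted_rev, max?_map]
      cases PySem.List.max? (keys.filter p) (fun x => (fun (row : String × Int) => row.2) ((fun k => (k, cnt k)) x)) <;> simp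
    have hlenfilter : ((PySem.List.sorted (keys.map fun k => (k, cnt k))
          (fun row => row.2) true).filter (fun item => p item.1)).length
        = (keys.filter p).length := by
      rw [filter_sorted_rev, hfilter, PySem.List.length_sorted, List.length_map]
    by_cases hos : os_name == "linux"
    · rw [if_pos hos, if_pos hos]
      by_cases hm : (keys.filter p) = []
      · rw [if_neg (by rw [hlenfilter, hm]; simp), if_neg (not_not_intro hm), hgetD, hmain]
      · rw [if_pos (by rw [hlenfilter]; exact List.length_pos_iff.mpr hm),
          if_pos hm, hgetD, hmusl]
    · rw [if_neg hos, if_neg hos, hgetD, hmain]
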